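-- pv_equiv track=rewrite | github.com/exteel/videoforge | tools/gen_all_newai.py | _apply_style
-- ===== SOURCE A (Python) =====
-- _STYLE_BOUNDARY_KEYWORDS = [
--     "dramatic cinematic lighting",
--     "digital concept art",
--     "epic sci-fi concept art",
--     "cinematic environment",
-- ]
--
-- def _apply_style(prompt: str, style: str) -> str:
--     """
--     Strip the existing style suffix from a prompt and replace with new style.
--
--     Finds the first occurrence of any _STYLE_BOUNDARY_KEYWORDS and cuts there,
--     then appends the new style. If no boundary is found, appends style directly.
--     """
--     prompt = prompt.strip().rstrip(",").strip()
--     cut_pos = len(prompt)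
--     for kw in _STYLE_BOUNDARY_KEYWORDS:
--         idx = prompt.lower().find(kw.lower())
--         if idx != -1 and idx < cut_pos:
--             cut_pos = idx
--
--     scene_part = prompt[:cut_pos].strip().rstrip(",").strip()
--     return f"{scene_part}, {style}"
-- ===== SOURCE B (Python) =====
-- _STYLE_BOUNDARY_KEYWORDS = [
--     "dramatic cinematic lighting",
--     "digital concept art",
--     "epic sci-fi concept art",
--     "cinematic environment",
-- ]
--
-- def _apply_style(prompt: str, style: str) -> str:
--     """Single left-to-right scan: cut at the first position where any
--     boundary keyword starts (case-insensitive), instead of four separate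
--     find() passes combined with a running minimum."""
--     prompt = prompt.strip().rstrip(",").strip()
--     low = prompt.lower()
--     kws = [kw.lower() for kw in _STYLE_BOUNDARY_KEYWORDS]
--     cut = len(prompt)
--     for i in range(len(prompt)):
--         if any(low.startswith(kw, i) for kw in kws):
--             cut = i
--             break
--     scene = prompt[:cut].strip().rstrip(",").strip()
--     return f"{scene}, {style}"
-- ===== Notes on version B (the rewrite author's own statement) =====
-- stated objective: alternative
-- what changed: Replaces A's four separate case-insensitive find() scans combined with a running minimum by one left-to-right scan that stops at the first position where any lowered keyword starts.
import Mathlib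
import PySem

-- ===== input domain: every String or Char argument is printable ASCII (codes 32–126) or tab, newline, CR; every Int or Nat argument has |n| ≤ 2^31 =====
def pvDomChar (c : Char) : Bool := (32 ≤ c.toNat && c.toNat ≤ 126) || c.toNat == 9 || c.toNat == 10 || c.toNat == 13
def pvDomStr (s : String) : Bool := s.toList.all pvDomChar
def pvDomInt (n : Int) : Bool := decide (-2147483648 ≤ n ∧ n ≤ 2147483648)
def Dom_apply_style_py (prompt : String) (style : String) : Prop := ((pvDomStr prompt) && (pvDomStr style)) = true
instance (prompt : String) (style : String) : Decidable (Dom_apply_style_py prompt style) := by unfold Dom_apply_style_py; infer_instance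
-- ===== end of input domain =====

-- B replaces A's four find()-scans + running minimum by one left-to-right scan for the
-- first position where any lowered keyword starts (objective: alternative, same cost).

-- ===== PORT A =====
def pvKeywords : List String :=
  ["dramatic cinematic lighting", "digital concept art",
   "epic sci-fi concept art", "cinematic environment"]

-- exact port of Python's s.rstrip(",") on the char list
def pvRstripComma (cs : List Char) : List Char :=
  (cs.reverse.dropWhile (· == ',')).reverse

-- the strip().rstrip(",").strip() chain both Pythons apply
def pvClean (cs : List Char) : List Char :=
  PySem.Chars.strip (pvRstripComma (PySem.Chars.strip cs))

-- A's loop body: lower the prompt, find the lowered keyword, keep the smaller index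
def pvStepA (p : List Char) (cut : Int) (kw : String) : Int :=
  let idx := PySem.Chars.find (PySem.Chars.lower p) (PySem.Chars.lower kw.toList)
  if idx ≠ -1 ∧ idx < cut then idx else cut

def apply_style_py (prompt : String) (style : String) : String :=
  let p := pvClean prompt.toList
  let cut : Int := pvKeywords.foldl (pvStepA p) (p.length : Int)
  let scene := pvClean (PySem.List.slice p none (some cut))
  String.ofList (scene ++ (", ".toList ++ style.toList))

-- ===== PORT B =====
-- first index i with some kw a prefix of (drop i); = length if none
def pvFirstB (kws : List (List Char)) : List Char → Nat
  | [] => 0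
  | c :: cs =>
      if kws.any (fun kw => PySem.Chars.startswith (c :: cs) kw) then 0
      else pvFirstB kws cs + 1

def apply_style_py_alt (prompt : String) (style : String) : String :=
  let p := pvClean prompt.toList
  let low := PySem.Chars.lower p
  let kws := pvKeywords.map (fun kw => PySem.Chars.lower kw.toList)
  let cut := pvFirstB kws low
  let scene := pvClean (p.take cut)
  String.ofList (scene ++ (", ".toList ++ style.toList))

-- ===== PRECONDITION & SPEC =====
def Spec_apply_style_py (prompt : String) (style : String) (out : String) : Prop := out = apply_style_py_alt prompt style
instance (prompt : String) (style : String) (out : String) : Decidable (Spec_apply_style_py prompt style out) := by unfold Spec_apply_style_py; infer_instance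

-- ===== CLAIM (what is proved, stated in full; the proofs are below) =====
def Claim_equal_apply_style_py : Prop := ∀ (prompt : String) (style : String), Dom_apply_style_py prompt style → Spec_apply_style_py prompt style (apply_style_py prompt style)

-- ===== LEMMAS AND PROOFS =====

lemma pvFoldA_le (p : List Char) (K : List String) :
    ∀ init : Int, K.foldl (pvStepA p) init ≤ init := by
  induction K with
  | nil => intro init; simp
  | cons kw K ih =>
      intro init
      refine le_trans (ih (pvStepA p init kw)) ?_
      simp only [pvStepA]
      split_ifs with h
      · exact le_of_lt h.2
      · exact le_refl _

lemma pvFoldA_le_find (p : List Char) (K : List String) :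
    ∀ init : Int, ∀ kw ∈ K, PySem.Chars.find (PySem.Chars.lower p) (PySem.Chars.lower kw.toList) ≠ -1 →
      K.foldl (pvStepA p) init ≤ PySem.Chars.find (PySem.Chars.lower p) (PySem.Chars.lower kw.toList) := by
  induction K with
  | nil => intro _ kw h; simp at h
  | cons kw0 K ih =>
      intro init kw hmem hne
      rcases List.mem_cons.mp hmem with h | h
      · subst h
        refine le_trans (pvFoldA_le p K _) ?_
        simp only [pvStepA]
        split_ifs with h
        · exact le_refl _
        · simp only [not_and, not_lt] at h
          exact h hne
      · exact ih _ kw h hne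

lemma pvFoldA_cases (p : List Char) (K : List String) :
    ∀ init : Int, K.foldl (pvStepA p) init = init ∨
      ∃ kw ∈ K, K.foldl (pvStepA p) init = PySem.Chars.find (PySem.Chars.lower p) (PySem.Chars.lower kw.toList) ∧
        PySem.Chars.find (PySem.Chars.lower p) (PySem.Chars.lower kw.toList) ≠ -1 := by
  induction K with
  | nil => intro init; left; rfl
  | cons kw0 K ih =>
      intro init
      rcases ih (pvStepA p init kw0) with h | ⟨kw, hmem, heq, hne⟩
      · simp only [List.foldl_cons, h]
        by_cases hc : PySem.Chars.find (PySem.Chars.lower p) (PySem.Chars.lower kw0.toList) ≠ -1 ∧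
            PySem.Chars.find (PySem.Chars.lower p) (PySem.Chars.lower kw0.toList) < init
        · right; exact ⟨kw0, List.mem_cons_self, by simp [pvStepA, hc], hc.1⟩
        · left; simp [pvStepA, hc]
      · right; exact ⟨kw, List.mem_cons_of_mem _ hmem, heq, hne⟩

lemma pvFirstB_le (kws : List (List Char)) (cs : List Char) :
    pvFirstB kws cs ≤ cs.length := by
  induction cs with
  | nil => simp [pvFirstB]
  | cons c cs ih =>
      simp only [pvFirstB]
      split_ifs with h
      · simp
      · simpa using Nat.succ_le_succ ih

lemma pvFirstB_no_match (kws : List (List Char)) (cs : List Char) :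
    ∀ i < pvFirstB kws cs, ∀ kw ∈ kws, ¬ kw <+: cs.drop i := by
  induction cs with
  | nil => simp [pvFirstB]
  | cons c cs ih =>
      intro i hi kw hkw
      simp only [pvFirstB] at hi
      split_ifs at hi with h
      · omega
      · cases i with
        | zero =>
            intro hpre
            exact h (List.any_eq_true.mpr ⟨kw, hkw, (PySem.Chars.startswith_iff _ _).mpr hpre⟩)
        | succ j =>
            simpa using ih j (by omega) kw hkw

lemma pvFirstB_match (kws : List (List Char)) (cs : List Char) :
    pvFirstB kws cs = cs.length ∨
      ∃ kw ∈ kws, kw <+: cs.drop (pvFirstB kws cs) := by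
  induction cs with
  | nil => left; simp [pvFirstB]
  | cons c cs ih =>
      simp only [pvFirstB]
      split_ifs with h
      · rcases List.any_eq_true.mp h with ⟨kw, hkw, hsw⟩
        right; exact ⟨kw, hkw, by simpa using (PySem.Chars.startswith_iff _ _).mp hsw⟩
      · rcases ih with h1 | ⟨kw, hkw, hpre⟩
        · left; simp [h1]
        · right; exact ⟨kw, hkw, by simpa using hpre⟩

lemma pvLower_length (cs : List Char) : (PySem.Chars.lower cs).length = cs.length := by
  simp [PySem.Chars.lower]

-- the two cut positions coincide
lemma pvCut_eq (p : List Char) :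
    pvKeywords.foldl (pvStepA p) (p.length : Int)
      = (pvFirstB (pvKeywords.map (fun kw => PySem.Chars.lower kw.toList))
          (PySem.Chars.lower p) : Int) := by
  set L := PySem.Chars.lower p with hL
  set kws := pvKeywords.map (fun kw => PySem.Chars.lower kw.toList) with hkws
  have hlen : L.length = p.length := pvLower_length p
  set b := pvFirstB kws L with hb
  have hble : b ≤ L.length := pvFirstB_le kws L
  -- foldl ≤ b
  have h1 : pvKeywords.foldl (pvStepA p) (p.length : Int) ≤ (b : Int) := by
    rcases pvFirstB_match kws L with hcase | ⟨kw, hkw, hpre⟩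
    · have := pvFoldA_le p pvKeywords (p.length : Int)
      omega
    · rcases List.mem_map.mp hkw with ⟨kw0, hkw0, rfl⟩
      have hfind : PySem.Chars.find (PySem.Chars.lower p) (PySem.Chars.lower kw0.toList) ≠ -1 := by
        rw [PySem.Chars.find_ne_neg_one_iff]
        exact (List.infix_iff_prefix_suffix.mpr
          ⟨_, hpre, List.drop_suffix _ _⟩)
      have hnn : 0 ≤ PySem.Chars.find (PySem.Chars.lower p) (PySem.Chars.lower kw0.toList) := by
        have := PySem.Chars.neg_one_le_find (s := PySem.Chars.lower p) (sub := PySem.Chars.lower kw0.toList)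
        omega
      have hspec := PySem.Chars.find_spec (s := PySem.Chars.lower p) (sub := PySem.Chars.lower kw0.toList) hnn
      have htn : (PySem.Chars.find (PySem.Chars.lower p) (PySem.Chars.lower kw0.toList)).toNat ≤ b := by
        by_contra hlt
        exact hspec.2 b (by omega) hpre
      have := pvFoldA_le_find p pvKeywords (p.length : Int) kw0 hkw0 hfind
      omega
  -- b ≤ foldl
  have h2 : (b : Int) ≤ pvKeywords.foldl (pvStepA p) (p.length : Int) := by
    rcases pvFoldA_cases p pvKeywords (p.length : Int) with hcase | ⟨kw0, hkw0, heq, hne⟩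
    · omega
    · have hnn : 0 ≤ PySem.Chars.find (PySem.Chars.lower p) (PySem.Chars.lower kw0.toList) := by
        have := PySem.Chars.neg_one_le_find (s := PySem.Chars.lower p) (sub := PySem.Chars.lower kw0.toList)
        omega
      have hspec := PySem.Chars.find_spec (s := PySem.Chars.lower p) (sub := PySem.Chars.lower kw0.toList) hnn
      have hmem : PySem.Chars.lower kw0.toList ∈ kws :=
        List.mem_map.mpr ⟨kw0, hkw0, rfl⟩
      have : ¬ ((PySem.Chars.find (PySem.Chars.lower p) (PySem.Chars.lower kw0.toList)).toNat < b) := by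
        intro hlt
        exact pvFirstB_no_match kws L _ hlt _ hmem hspec.1
      omega
  omega

-- ===== VERDICT (by name: the statement is the Claim_ definition above) =====
theorem apply_style_py_spec : Claim_equal_apply_style_py := by
  intro prompt style _
  unfold Spec_apply_style_py apply_style_py apply_style_py_alt
  dsimp only
  rw [pvCut_eq, PySem.List.slice_to_natCast]
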